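-- pv_equiv track=rewrite | github.com/chughtapan/praga_core | src/pragweb/services/people.py | _find_best_name_for_email
-- ===== SOURCE A (Python) =====
-- from typing import Any, Dict, List, Optional, Tuple
--
-- def _find_best_name_for_email(
--     email: str, name_list: List[Tuple[str, str]]
-- ) -> Optional[Tuple[str, str]]:
--     """Find the best display name for an email from multiple occurrences.
--
--     Strategy:
--     1. Prefer entries with both first and last name
--     2. Skip entries where the name is just the email local part
--     3. Return None if no good name is found
--
--     Args:
--         email: The email address
--         name_list: List of (first_name, last_name) tuples from different messages
--
--     Returns:
--         Tuple of (first_name, last_name) or None if no good name found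
--     """
--     best_first = ""
--     best_last = ""
--     email_local_part = email.split("@")[0] if "@" in email else ""
--
--     for first_name, last_name in name_list:
--         # Skip if this is just the email local part (e.g., "jdoe" from "jdoe@example.com")
--         if first_name == email_local_part and not last_name:
--             continue
--
--         # Full name (first + last) is always preferred
--         if first_name and last_name and not best_last:
--             best_first = first_name
--             best_last = last_name
--         # Otherwise use any real first name we find
--         elif first_name and not best_first:
--             best_first = first_name
--             best_last = last_name
--
--     # Only return a name if we found something better than the email local part
--     if best_first and (best_last or best_first != email_local_part):
--         return (best_first, best_last)
--
--     return None
-- ===== SOURCE B (Python) =====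
-- from typing import List, Optional, Tuple
--
-- def _find_best_name_for_email(
--     email: str, name_list: List[Tuple[str, str]]
-- ) -> Optional[Tuple[str, str]]:
--     """Pick best display name: first full (first+last) name wins; otherwise the
--     first bare first name that is not the email local part; else None."""
--     email_local_part = email.split("@")[0] if "@" in email else ""
--
--     # Pass 1: the earliest entry with both a first and a last name.
--     full = next(((f, l) for f, l in name_list if f and l), None)
--     if full is not None:
--         return full
--
--     # Pass 2: the earliest first-name-only entry that isn't just the local part.
--     return next(
--         ((f, l) for f, l in name_list if f and not l and f != email_local_part),
--         None,
--     )
-- ===== Notes on version B (the rewrite author's own statement) =====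
-- stated objective: simpler
-- what changed: Replaced the stateful accumulate-and-upgrade loop plus final guard with two priority-ordered filtered searches: return the first full (first+last) name, else the first bare first name differing from the email local part, else None.
import Mathlib
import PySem

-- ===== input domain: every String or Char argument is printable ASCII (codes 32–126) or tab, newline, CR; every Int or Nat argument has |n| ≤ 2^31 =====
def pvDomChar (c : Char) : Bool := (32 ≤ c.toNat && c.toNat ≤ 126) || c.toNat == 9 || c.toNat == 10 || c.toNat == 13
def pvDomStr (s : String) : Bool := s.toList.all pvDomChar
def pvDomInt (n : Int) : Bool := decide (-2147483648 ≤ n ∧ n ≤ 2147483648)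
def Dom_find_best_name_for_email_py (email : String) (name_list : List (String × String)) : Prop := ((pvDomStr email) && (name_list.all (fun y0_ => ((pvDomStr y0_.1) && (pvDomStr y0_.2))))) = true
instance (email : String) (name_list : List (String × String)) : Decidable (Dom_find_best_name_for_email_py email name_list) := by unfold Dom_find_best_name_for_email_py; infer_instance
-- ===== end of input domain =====

-- B replaces A's stateful accumulate-and-upgrade loop with two priority-ordered filtered searches (simpler decomposition, same O(n) cost).


-- ===== PORT A =====
def find_best_name_for_email_py (email : String) (name_list : List (String × String)) : Option (String × String) :=
  -- email_local_part = email.split("@")[0] if "@" in email else ""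
  let email_local_part :=
    if PySem.Str.isIn "@" email then ((PySem.Str.split? email "@").getD []).headD "" else ""
  -- for first_name, last_name in name_list: ...  (state = (best_first, best_last))
  let best := name_list.foldl
    (fun (b : String × String) (p : String × String) =>
      if p.1 == email_local_part && p.2 == "" then b
      else if (!(p.1 == "")) && (!(p.2 == "")) && (b.2 == "") then (p.1, p.2)
      else if (!(p.1 == "")) && (b.1 == "") then (p.1, p.2)
      else b)
    ("", "")
  if (!(best.1 == "")) && ((!(best.2 == "")) || (!(best.1 == email_local_part))) then
    some best
  else none

-- ===== PORT B =====
def find_best_name_for_email_py_alt (email : String) (name_list : List (String × String)) : Option (String × String) :=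
  let email_local_part :=
    if PySem.Str.isIn "@" email then ((PySem.Str.split? email "@").getD []).headD "" else ""
  -- pass 1: earliest full name
  match name_list.find? (fun p => (!(p.1 == "")) && (!(p.2 == ""))) with
  | some p => some p
  | none =>
    -- pass 2: earliest bare first name that is not the lp part
    name_list.find? (fun p => (!(p.1 == "")) && (p.2 == "") && (!(p.1 == email_local_part)))

-- ===== PRECONDITION & SPEC =====
def Spec_find_best_name_for_email_py (email : String) (name_list : List (String × String)) (out : Option (String × String)) : Prop := out = find_best_name_for_email_py_alt email name_list
instance (email : String) (name_list : List (String × String)) (out : Option (String × String)) : Decidable (Spec_find_best_name_for_email_py email name_list out) := by unfold Spec_find_best_name_for_email_py; infer_instance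

-- ===== CLAIM (what is proved, stated in full; the proofs are below) =====
def Claim_equal_find_best_name_for_email_py : Prop := ∀ (email : String) (name_list : List (String × String)), Dom_find_best_name_for_email_py email name_list → Spec_find_best_name_for_email_py email name_list (find_best_name_for_email_py email name_list)

-- ===== LEMMAS AND PROOFS =====

-- A's loop step, exactly the lambda in port A, with the lp part generalized
def pvStep (lp : String) (b p : String × String) : String × String :=
  if p.1 == lp && p.2 == "" then b
  else if (!(p.1 == "")) && (!(p.2 == "")) && (b.2 == "") then (p.1, p.2)
  else if (!(p.1 == "")) && (b.1 == "") then (p.1, p.2)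
  else b

def pvCoreA (lp : String) (l : List (String × String)) : Option (String × String) :=
  let best := l.foldl (pvStep lp) ("", "")
  if (!(best.1 == "")) && ((!(best.2 == "")) || (!(best.1 == lp))) then some best
  else none

def pvCoreB (lp : String) (l : List (String × String)) : Option (String × String) :=
  match l.find? (fun p => (!(p.1 == "")) && (!(p.2 == ""))) with
  | some p => some p
  | none => l.find? (fun p => (!(p.1 == "")) && (p.2 == "") && (!(p.1 == lp)))

-- once both components of the state are nonempty, A's loop never changes it
lemma pv_loop_full (lp : String) (l : List (String × String)) (b : String × String)
    (h1 : (b.1 == "") = false) (h2 : (b.2 == "") = false) :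
    l.foldl (pvStep lp) b = b := by
  induction l with
  | nil => rfl
  | cons p t ih =>
    have hb : pvStep lp b p = b := by simp [pvStep, h1, h2]
    rw [List.foldl_cons, hb, ih]

-- from a bare-first-name state, A's loop returns the first full name if any, else the state
lemma pv_loop_partial (lp : String) (l : List (String × String)) (bf : String)
    (h : (bf == "") = false) :
    l.foldl (pvStep lp) (bf, "") =
      (match l.find? (fun p => (!(p.1 == "")) && (!(p.2 == ""))) with
       | some p => p
       | none => (bf, "")) := by
  induction l with
  | nil => rfl
  | cons p t ih =>
    by_cases h1 : p.1 = "" <;> by_cases h2 : p.2 = ""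
    · simp only [List.foldl_cons, List.find?_cons, h1, h2]
      simpa [pvStep, h1, h2] using ih
    · simp only [List.foldl_cons, List.find?_cons, h1]
      simpa [pvStep, h1, h2] using ih
    · simp only [List.foldl_cons, List.find?_cons, h2]
      simpa [pvStep, h1, h2, h] using ih
    · -- p is a full name: the loop takes it and afterwards never changes
      have hstep : pvStep lp (bf, "") p = (p.1, p.2) := by
        simp [pvStep, h1, h2]
      simp only [List.foldl_cons, List.find?_cons, hstep]
      rw [pv_loop_full lp t (p.1, p.2) (by simp [h1]) (by simp [h2])]
      simp [beq_eq_false_iff_ne.mpr h1, beq_eq_false_iff_ne.mpr h2]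

lemma pv_core_eq (lp : String) (l : List (String × String)) :
    pvCoreA lp l = pvCoreB lp l := by
  induction l with
  | nil => rfl
  | cons p t ih =>
    by_cases h1 : p.1 = ""
    · -- no first name: A's loop keeps the empty state, B skips it in both passes
      have hstep : pvStep lp ("", "") p = ("", "") := by simp [pvStep, h1]
      simpa [pvCoreA, pvCoreB, List.find?_cons, hstep, h1] using ih
    · by_cases h2 : p.2 = ""
      · by_cases h3 : p.1 = lp
        · -- bare lp part: A skips it, B's partial predicate rejects it
          have hstep : pvStep lp ("", "") p = ("", "") := by simp [pvStep, h2, h3]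
          simpa [pvCoreA, pvCoreB, List.find?_cons, hstep, h1, h2, h3] using ih
        · -- eligible bare first name: now A returns the first later full name or p
          have hstep : pvStep lp ("", "") p = (p.1, "") := by
            simp [pvStep, h1, h2, h3]
          have hp : p = (p.1, "") := by rw [← h2]
          simp only [pvCoreA, pvCoreB, List.foldl_cons, List.find?_cons, hstep]
          rw [pv_loop_partial lp t p.1 (by simp [h1])]
          cases hfind : t.find? (fun q => (!(q.1 == "")) && (!(q.2 == ""))) with
          | none =>
            simp [beq_eq_false_iff_ne.mpr h1, beq_iff_eq.mpr h2,
                  beq_eq_false_iff_ne.mpr h3, ← hp]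
          | some q =>
            have hq := List.find?_some hfind
            simp only [Bool.and_eq_true, Bool.not_eq_true', beq_eq_false_iff_ne] at hq
            simp [h2, hq.1, hq.2]
      · -- full name: A takes it and freezes, B's first pass returns it
        have hstep : pvStep lp ("", "") p = (p.1, p.2) := by simp [pvStep, h1, h2]
        simp only [pvCoreA, pvCoreB, List.foldl_cons, List.find?_cons, hstep]
        rw [pv_loop_full lp t (p.1, p.2) (by simp [h1]) (by simp [h2])]
        simp [beq_eq_false_iff_ne.mpr h1, beq_eq_false_iff_ne.mpr h2]

-- ===== VERDICT (by name: the statement is the Claim_ definition above) =====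
theorem find_best_name_for_email_py_spec : Claim_equal_find_best_name_for_email_py := by
  intro email name_list _
  show find_best_name_for_email_py email name_list = find_best_name_for_email_py_alt email name_list
  exact pv_core_eq _ name_list
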